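-- pv_equiv track=rewrite | github.com/SolidCode/SolidPython | solid/extrude_along_path.py | _loop_facet_indices
-- ===== SOURCE A (Python) =====
-- from typing import Dict, Optional, Sequence, Tuple, Union, List, Callable
--
-- FacetIndices = Tuple[int, int, int]
--
-- def _loop_facet_indices(loop_start_index:int, loop_pt_count:int, next_loop_start_index=None) -> List[FacetIndices]:
--     facet_indices: List[FacetIndices] = []
--     # nlsi == next_loop_start_index
--     if next_loop_start_index == None:
--         next_loop_start_index = loop_start_index + loop_pt_count
--     loop_indices      = list(range(loop_start_index,      loop_pt_count + loop_start_index)) + [loop_start_index]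
--     next_loop_indices = list(range(next_loop_start_index, loop_pt_count + next_loop_start_index )) + [next_loop_start_index]
--
--     for i, (a, b) in enumerate(zip(loop_indices[:-1], loop_indices[1:])):
--         #   c--d
--         #   |\ |
--         #   | \|
--         #   a--b
--         c, d = next_loop_indices[i: i+2]
--         facet_indices.append((a,c,b))
--         facet_indices.append((b,c,d))
--     return facet_indices
-- ===== SOURCE B (Python) =====
-- def _loop_facet_indices(loop_start_index, loop_pt_count, next_loop_start_index=None):
--     # Two running cursors walk both loops in lockstep over the straight segments;
--     # the seam quad closing the ring is emitted separately after the loop.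
--     if next_loop_start_index == None:
--         next_loop_start_index = loop_start_index + loop_pt_count
--     if loop_pt_count <= 0:
--         return []
--     out = []
--     a, c = loop_start_index, next_loop_start_index
--     for _ in range(loop_pt_count - 1):
--         out.append((a, c, a + 1))
--         out.append((a + 1, c, c + 1))
--         a += 1
--         c += 1
--     out.append((a, c, loop_start_index))
--     out.append((loop_start_index, c, next_loop_start_index))
--     return out
-- ===== Notes on version B (the rewrite author's own statement) =====
-- stated objective: alternative
-- what changed: Instead of precomputing two augmented index lists and zipping slices, B walks two running cursors in lockstep over the straight ring segments (no wrap-around arithmetic in the loop) and emits the seam quad that closes the ring as a separate step after the loop.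
import Mathlib
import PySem

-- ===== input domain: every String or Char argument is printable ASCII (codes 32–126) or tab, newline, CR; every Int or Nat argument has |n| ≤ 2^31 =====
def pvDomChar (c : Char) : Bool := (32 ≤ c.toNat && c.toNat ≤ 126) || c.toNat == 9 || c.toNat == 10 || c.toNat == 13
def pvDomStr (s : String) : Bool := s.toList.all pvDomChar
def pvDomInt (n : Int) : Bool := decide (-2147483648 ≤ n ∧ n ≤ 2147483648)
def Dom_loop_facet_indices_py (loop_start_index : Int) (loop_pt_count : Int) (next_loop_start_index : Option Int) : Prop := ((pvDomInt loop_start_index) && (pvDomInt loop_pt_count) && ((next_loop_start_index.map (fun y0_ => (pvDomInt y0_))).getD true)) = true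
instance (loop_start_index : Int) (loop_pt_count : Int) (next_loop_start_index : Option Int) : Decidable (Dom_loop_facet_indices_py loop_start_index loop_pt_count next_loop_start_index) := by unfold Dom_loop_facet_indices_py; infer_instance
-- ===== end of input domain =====

-- B replaces A's augmented index lists + zip/enumerate/slicing with two running
-- cursors over the straight segments and a separate seam quad closing the ring;
-- same return value (alternative decomposition, not faster).

-- ===== PORT A =====
-- Port of A: builds the augmented index lists, zips the [:-1] and [1:] slices,
-- and for each enumerated pair takes next_loop_indices[i:i+2] (the unreachable
-- non-2-element match arm appends nothing, where Python would raise on unpack).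
def loop_facet_indices_py (loop_start_index : Int) (loop_pt_count : Int) (next_loop_start_index : Option Int) : List (Int × Int × Int) :=
  let nlsi : Int := match next_loop_start_index with
    | none => loop_start_index + loop_pt_count
    | some v => v
  let loop_indices := PySem.List.pyRange loop_start_index (loop_pt_count + loop_start_index) 1 ++ [loop_start_index]
  let next_loop_indices := PySem.List.pyRange nlsi (loop_pt_count + nlsi) 1 ++ [nlsi]
  (PySem.List.enumerate (List.zip (PySem.List.slice loop_indices none (some (-1))) (PySem.List.slice loop_indices (some 1) none)) 0).foldl
    (fun acc p =>
      match PySem.List.slice next_loop_indices (some p.1) (some (p.1 + 2)) with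
      | [c, d] => acc ++ [(p.2.1, c, p.2.2), (p.2.2, c, d)]
      | _ => acc)
    []

-- ===== PORT B =====
-- B's loop body: advance the two cursors (a, c) after emitting the two
-- triangles of the current straight segment.
def pvAltStep (st : List (Int × Int × Int) × Int × Int) (_ : Int) : List (Int × Int × Int) × Int × Int :=
  (st.1 ++ [(st.2.1, st.2.2, st.2.1 + 1), (st.2.1 + 1, st.2.2, st.2.2 + 1)], st.2.1 + 1, st.2.2 + 1)

-- Port of B: cursors over the straight segments, then the seam quad.
def loop_facet_indices_py_alt (loop_start_index : Int) (loop_pt_count : Int) (next_loop_start_index : Option Int) : List (Int × Int × Int) :=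
  let nlsi : Int := next_loop_start_index.getD (loop_start_index + loop_pt_count)
  if loop_pt_count ≤ 0 then []
  else
    let s := (PySem.List.pyRange 0 (loop_pt_count - 1) 1).foldl pvAltStep ([], loop_start_index, nlsi)
    s.1 ++ [(s.2.1, s.2.2, loop_start_index), (loop_start_index, s.2.2, nlsi)]

-- ===== PRECONDITION & SPEC =====
def Spec_loop_facet_indices_py (loop_start_index : Int) (loop_pt_count : Int) (next_loop_start_index : Option Int) (out : List (Int × Int × Int)) : Prop := out = loop_facet_indices_py_alt loop_start_index loop_pt_count next_loop_start_index
instance (loop_start_index : Int) (loop_pt_count : Int) (next_loop_start_index : Option Int) (out : List (Int × Int × Int)) : Decidable (Spec_loop_facet_indices_py loop_start_index loop_pt_count next_loop_start_index out) := by unfold Spec_loop_facet_indices_py; infer_instance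

-- ===== CLAIM (what is proved, stated in full; the proofs are below) =====
def Claim_equal_loop_facet_indices_py : Prop := ∀ (loop_start_index : Int) (loop_pt_count : Int) (next_loop_start_index : Option Int), Dom_loop_facet_indices_py loop_start_index loop_pt_count next_loop_start_index → Spec_loop_facet_indices_py loop_start_index loop_pt_count next_loop_start_index (loop_facet_indices_py loop_start_index loop_pt_count next_loop_start_index)

-- ===== LEMMAS AND PROOFS =====

-- common normal form both ports are reduced to: one flatMap with modular wrap
def pvModForm (lsi cnt nlsi : Int) : List (Int × Int × Int) :=
  (PySem.List.pyRange 0 cnt 1).flatMap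
    (fun i =>
      let j := PySem.Int.mod (i + 1) cnt
      [(lsi + i, nlsi + i, lsi + j), (lsi + j, nlsi + i, nlsi + j)])

-- taking two elements after dropping k is the pair of adjacent elements
lemma take_two_drop {α : Type} (ys : List α) (k : Nat) (h : k + 2 ≤ ys.length) :
    (ys.drop k).take 2 = [ys[k]'(by omega), ys[k+1]'(by omega)] := by
  rw [List.drop_eq_getElem_cons (by omega : k < ys.length)]
  rw [show List.drop (k+1) ys = ys[k+1]'(by omega) :: List.drop (k+2) ys from List.drop_eq_getElem_cons (by omega)]
  rfl

-- element k of an index range augmented with a wrap-around element x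
lemma aug_get (a b x : Int) (k : Nat) (h : k < (PySem.List.pyRange a b 1 ++ [x]).length) :
    (PySem.List.pyRange a b 1 ++ [x])[k] = if k < (b - a).toNat then a + k else x := by
  by_cases hk : k < (b - a).toNat
  · rw [List.getElem_append_left (by simpa [PySem.List.length_pyRange_one] using hk)]
    simp [PySem.List.getElem_pyRange_one, hk]
  · rw [List.getElem_append_right (by simp [PySem.List.length_pyRange_one]; omega)]
    simp [hk]

-- A's port, with the defaulted second loop start resolved, equals the normal form
lemma a_eq_mod (lsi cnt nlsi : Int) :
    loop_facet_indices_py lsi cnt (some nlsi) = pvModForm lsi cnt nlsi := by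
  by_cases hc : cnt ≤ 0
  · simp [loop_facet_indices_py, pvModForm,
      PySem.List.pyRange_one_eq_nil (by omega : cnt + lsi ≤ lsi),
      PySem.List.pyRange_one_eq_nil hc, PySem.List.slice_to_neg_one]
  · replace hc : 0 < cnt := by omega
    unfold loop_facet_indices_py
    simp only [PySem.List.slice_to_neg_one, PySem.List.slice_from_one, List.dropLast_concat]
    rw [show (PySem.List.pyRange lsi (cnt + lsi) 1 ++ [lsi]).tail
        = PySem.List.pyRange (lsi + 1) (cnt + lsi) 1 ++ [lsi] from by
      rw [PySem.List.pyRange_one_cons (show lsi < cnt + lsi by omega)]; rfl]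
    rw [show (fun (acc : List (Int × Int × Int)) (p : Int × Int × Int) =>
        match PySem.List.slice (PySem.List.pyRange nlsi (cnt + nlsi) 1 ++ [nlsi]) (some p.1) (some (p.1 + 2)) with
        | [c, d] => acc ++ [(p.2.1, c, p.2.2), (p.2.2, c, d)]
        | _ => acc)
      = (fun acc p => acc ++ (match PySem.List.slice (PySem.List.pyRange nlsi (cnt + nlsi) 1 ++ [nlsi]) (some p.1) (some (p.1 + 2)) with
        | [c, d] => [(p.2.1, c, p.2.2), (p.2.2, c, d)]
        | _ => [])) from by
      funext acc p
      rcases h : PySem.List.slice (PySem.List.pyRange nlsi (cnt + nlsi) 1 ++ [nlsi]) (some p.1) (some (p.1 + 2)) with _ | ⟨c, _ | ⟨d, _ | _⟩⟩ <;> simp]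
    rw [PySem.List.foldl_append_eq_flatMap]
    unfold pvModForm
    simp only [List.nil_append, List.flatMap_def]
    congr 1
    apply List.ext_getElem
    · simp [PySem.List.length_enumerate, List.length_zip, List.length_append,
        PySem.List.length_pyRange_one]
      omega
    · intro k h1 h2
      have hk : k < cnt.toNat := by
        simp [PySem.List.length_enumerate, List.length_zip, List.length_append,
          PySem.List.length_pyRange_one] at h1
        omega
      simp only [List.getElem_map, PySem.List.getElem_enumerate, List.getElem_zip]
      have hsl : PySem.List.slice (PySem.List.pyRange nlsi (cnt + nlsi) 1 ++ [nlsi])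
          (some ((0:Int) + k)) (some ((0:Int) + k + 2))
          = [nlsi + k, if k + 1 < cnt.toNat then nlsi + (k+1) else nlsi] := by
        have hlen : (PySem.List.pyRange nlsi (cnt + nlsi) 1 ++ [nlsi]).length = cnt.toNat + 1 := by
          simp [PySem.List.length_pyRange_one]
        rw [(show ((0:Int) + k) = ((k : Nat) : Int) from by omega),
            (show ((k : Nat) : Int) + 2 = (((k + 2 : Nat)) : Int) from by omega)]
        rw [PySem.List.slice_natCast, show k + 2 - k = 2 by omega]
        rw [take_two_drop _ k (by omega)]
        rw [aug_get, aug_get]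
        have e1 : (cnt + nlsi - nlsi).toNat = cnt.toNat := by omega
        rw [e1]
        simp only [if_pos hk]
        by_cases hl : k + 1 < cnt.toNat <;> simp [hl]
      rw [hsl]
      simp only [aug_get, PySem.List.getElem_pyRange_one]
      have e1 : (cnt + lsi - (lsi + 1)).toNat = cnt.toNat - 1 := by omega
      rw [e1]
      have hmod : PySem.Int.mod ((0:Int) + k + 1) cnt
          = if k + 1 < cnt.toNat then ((k:Int) + 1) else 0 := by
        rw [PySem.Int.mod_eq_emod_of_pos (by omega)]
        by_cases hl : k + 1 < cnt.toNat
        · rw [if_pos hl, Int.emod_eq_of_lt (by omega) (by omega)]; ring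
        · rw [if_neg hl, show (0:Int) + k + 1 = cnt by omega, Int.emod_self]
      rw [hmod]
      by_cases hl : k + 1 < cnt.toNat
      · simp only [if_pos hl, if_pos (show k < cnt.toNat - 1 by omega)]
        simp [Prod.ext_iff] <;> omega
      · simp only [if_neg hl, if_neg (show ¬ k < cnt.toNat - 1 by omega)]
        simp

-- B's cursor fold over m straight segments, characterized in closed form
lemma alt_fold (a0 c0 : Int) (out0 : List (Int × Int × Int)) (m : Nat) :
    (PySem.List.pyRange 0 (m : Int) 1).foldl pvAltStep (out0, a0, c0)
      = (out0 ++ (List.range m).flatMap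
          (fun (k : Nat) => [(a0 + (k : Int), c0 + (k : Int), a0 + (k : Int) + 1),
                             (a0 + (k : Int) + 1, c0 + (k : Int), c0 + (k : Int) + 1)]),
         a0 + m, c0 + m) := by
  induction m generalizing out0 a0 c0 with
  | zero => simp [PySem.List.pyRange_one_eq_nil (by norm_num : (0:Int) ≤ 0)]
  | succ m ih =>
    rw [show ((m + 1 : Nat) : Int) = (m : Int) + 1 by push_cast; ring,
        PySem.List.pyRange_one_succ_right (Int.natCast_nonneg m)]
    rw [List.foldl_append, ih]
    simp only [List.foldl_cons, List.foldl_nil, pvAltStep, List.range_succ,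
      List.flatMap_append, List.flatMap_cons, List.flatMap_nil, List.append_nil,
      List.append_assoc, Prod.mk.injEq]
    exact ⟨trivial, by push_cast; ring, by push_cast; ring⟩

-- B's port, with the defaulted second loop start resolved, equals the normal form
lemma b_eq_mod (lsi cnt nlsi : Int) :
    loop_facet_indices_py_alt lsi cnt (some nlsi) = pvModForm lsi cnt nlsi := by
  by_cases hc : cnt ≤ 0
  · simp [loop_facet_indices_py_alt, pvModForm, hc, PySem.List.pyRange_one_eq_nil hc]
  · have hpos : 0 < cnt := by omega
    have hn : ((cnt.toNat : Int)) = cnt := Int.toNat_of_nonneg (by omega)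
    set n := cnt.toNat with hndef
    have hn1 : 1 ≤ n := by omega
    unfold loop_facet_indices_py_alt
    simp only [Option.getD_some, if_neg (by omega : ¬ cnt ≤ 0)]
    rw [show cnt - 1 = ((n - 1 : Nat) : Int) by omega, alt_fold]
    simp only [List.nil_append]
    unfold pvModForm
    rw [show PySem.List.pyRange 0 cnt 1 = (List.range n).map (fun k => ((k : Nat) : Int)) from by
      rw [PySem.List.pyRange_one]
      simp [hndef]]
    rw [show List.range n = List.range (n - 1) ++ [n - 1] from by
      rw [← List.range_succ]; congr 1; omega]
    rw [List.map_append, List.flatMap_append, List.map_singleton, List.flatMap_singleton]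
    congr 1
    · rw [List.flatMap_map]
      apply List.flatMap_congr
      intro k hk
      have hklt : k < n - 1 := List.mem_range.mp hk
      have hmod : PySem.Int.mod ((k : Int) + 1) cnt = (k : Int) + 1 := by
        rw [PySem.Int.mod_eq_emod_of_pos (by omega)]
        exact Int.emod_eq_of_lt (by omega) (by omega)
      simp only [hmod, add_assoc]
    · have hmod : PySem.Int.mod (((n - 1 : Nat) : Int) + 1) cnt = 0 := by
        rw [PySem.Int.mod_eq_emod_of_pos (by omega), show ((n - 1 : Nat) : Int) + 1 = cnt by omega]
        exact Int.emod_self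
      simp only [hmod]
      simp [Prod.ext_iff]

-- ===== VERDICT (by name: the statement is the Claim_ definition above) =====
theorem loop_facet_indices_py_spec : Claim_equal_loop_facet_indices_py := by
  intro lsi cnt nlsi _
  unfold Spec_loop_facet_indices_py
  cases nlsi with
  | none =>
      have hA : loop_facet_indices_py lsi cnt none
          = loop_facet_indices_py lsi cnt (some (lsi + cnt)) := by
        simp [loop_facet_indices_py]
      have hB : loop_facet_indices_py_alt lsi cnt none
          = loop_facet_indices_py_alt lsi cnt (some (lsi + cnt)) := by
        simp [loop_facet_indices_py_alt]
      rw [hA, hB, a_eq_mod, b_eq_mod]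
  | some v => rw [a_eq_mod, b_eq_mod]
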